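-- pv_equiv track=rewrite | github.com/sandeepgit32/flask_home_expense_tracker | utils.py | get_last_few_months_year_month_time_bucket
-- ===== SOURCE A (Python) =====
-- def create_year_month_time_bucket(current_year, current_month):
--     if current_month <= 9:
--         return f'{current_year}_0{current_month}'
--     else:
--         return f'{current_year}_{current_month}'
--
-- def get_last_few_months_year_month_time_bucket(current_year, current_month):
--     past_num_months = 6
--     if current_month >= past_num_months:
--         return [create_year_month_time_bucket(current_year, y) for y in range(current_month-5, current_month+1)]
--     else:
--         time_buckets_in_CY = [create_year_month_time_bucket(current_year, y) for y in range(1, current_month+1)]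
--         num_months_LY = past_num_months - current_month
--         time_buckets_in_LY = [create_year_month_time_bucket(current_year-1, y) for y in range(12-num_months_LY+1, 13)]
--         return time_buckets_in_LY + time_buckets_in_CY
-- ===== SOURCE B (Python) =====
-- def get_last_few_months_year_month_time_bucket(current_year, current_month):
--     # One uniform forward walk over (year, month) state from a computed start
--     # point, with a single year-carry step, instead of A's >=6 branch building
--     # two/three separate range comprehensions and concatenating them.
--     if current_month >= 6:
--         year, k = current_year, current_month - 5
--     else:
--         year, k = current_year - 1, current_month + 7
--     out = []
--     while year < current_year or (year == current_year and k <= current_month):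
--         out.append(f'{year}_0{k}' if k <= 9 else f'{year}_{k}')
--         if year < current_year and k >= 12:
--             year, k = year + 1, 1
--         else:
--             k += 1
--     return out
-- ===== Notes on version B (the rewrite author's own statement) =====
-- stated objective: alternative
-- what changed: Replaces A's >=6 branch with its two/three separate range comprehensions and list concatenation by one uniform forward walk over a (year, month) state from a computed start point, with a single year-carry step at month 12.
import Mathlib
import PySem

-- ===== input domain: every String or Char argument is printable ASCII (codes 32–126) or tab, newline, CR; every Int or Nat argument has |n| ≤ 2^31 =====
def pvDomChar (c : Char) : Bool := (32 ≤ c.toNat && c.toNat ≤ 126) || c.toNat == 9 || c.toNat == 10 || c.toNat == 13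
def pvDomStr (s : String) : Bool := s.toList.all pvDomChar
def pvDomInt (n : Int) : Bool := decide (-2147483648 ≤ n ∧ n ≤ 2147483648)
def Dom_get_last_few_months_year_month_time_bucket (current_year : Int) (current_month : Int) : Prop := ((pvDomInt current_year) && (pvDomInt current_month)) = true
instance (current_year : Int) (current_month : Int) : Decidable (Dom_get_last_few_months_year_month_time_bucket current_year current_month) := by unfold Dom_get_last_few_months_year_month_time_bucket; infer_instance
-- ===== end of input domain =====

-- B replaces A's >=6 branch with its separate range comprehensions by one uniform
-- forward walk over a (year, month) state with a single year-carry (objective: alternative).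

-- ===== PORT A =====
def create_year_month_time_bucket (current_year : Int) (current_month : Int) : String :=
  if current_month ≤ 9 then
    PySem.Int.toStr current_year ++ "_0" ++ PySem.Int.toStr current_month
  else
    PySem.Int.toStr current_year ++ "_" ++ PySem.Int.toStr current_month

def get_last_few_months_year_month_time_bucket (current_year : Int) (current_month : Int) : List String :=
  let past_num_months : Int := 6
  if current_month ≥ past_num_months then
    (PySem.List.pyRange (current_month - 5) (current_month + 1) 1).map
      (fun y => create_year_month_time_bucket current_year y)
  else
    let time_buckets_in_CY :=
      (PySem.List.pyRange 1 (current_month + 1) 1).map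
        (fun y => create_year_month_time_bucket current_year y)
    let num_months_LY := past_num_months - current_month
    let time_buckets_in_LY :=
      (PySem.List.pyRange (12 - num_months_LY + 1) 13 1).map
        (fun y => create_year_month_time_bucket (current_year - 1) y)
    time_buckets_in_LY ++ time_buckets_in_CY

-- ===== PORT B =====
-- the f-string of Source B's loop body
def pvBucket (year : Int) (k : Int) : String :=
  if k ≤ 9 then PySem.Int.toStr year ++ "_0" ++ PySem.Int.toStr k
  else PySem.Int.toStr year ++ "_" ++ PySem.Int.toStr k

-- Source B's while loop: state (year, k); emit, then either carry into the current
-- year (year < current_year and k >= 12) or step k+1; stop when past (cy, cm).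
def pvWalk (cy cm : Int) (year k : Int) : List String :=
  if year < cy ∨ (year = cy ∧ k ≤ cm) then
    pvBucket year k ::
      (if year < cy ∧ 12 ≤ k then pvWalk cy cm (cy) 1 else pvWalk cy cm year (k + 1))
  else []
termination_by (if year < cy then (12 - k).toNat + cm.toNat + 1 else (cm - k + 1).toNat)
decreasing_by
  · split_ifs <;> omega
  · split_ifs <;> omega

def get_last_few_months_year_month_time_bucket_alt (current_year : Int) (current_month : Int) : List String :=
  if current_month ≥ 6 then
    pvWalk current_year current_month current_year (current_month - 5)
  else
    pvWalk current_year current_month (current_year - 1) (current_month + 7)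

-- ===== PRECONDITION & SPEC =====
def Spec_get_last_few_months_year_month_time_bucket (current_year : Int) (current_month : Int) (out : List String) : Prop := out = get_last_few_months_year_month_time_bucket_alt current_year current_month
instance (current_year : Int) (current_month : Int) (out : List String) : Decidable (Spec_get_last_few_months_year_month_time_bucket current_year current_month out) := by unfold Spec_get_last_few_months_year_month_time_bucket; infer_instance

-- ===== CLAIM (what is proved, stated in full; the proofs are below) =====
def Claim_equal_get_last_few_months_year_month_time_bucket : Prop := ∀ (current_year : Int) (current_month : Int), Dom_get_last_few_months_year_month_time_bucket current_year current_month → Spec_get_last_few_months_year_month_time_bucket current_year current_month (get_last_few_months_year_month_time_bucket current_year current_month)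

-- ===== LEMMAS AND PROOFS =====

theorem pvBucket_eq (y k : Int) : pvBucket y k = create_year_month_time_bucket y k := rfl

-- walking inside the current year = the current-year range comprehension
theorem pvWalk_cur (cy cm : Int) : ∀ k : Int,
    pvWalk cy cm cy k = (PySem.List.pyRange k (cm + 1) 1).map (fun y => create_year_month_time_bucket cy y) := by
  intro k
  by_cases h : k ≤ cm
  · rw [pvWalk]
    have hk : k < cm + 1 := by omega
    rw [PySem.List.pyRange_one_cons hk]
    simp only [List.map_cons]
    have hlt : ¬ cy < cy := lt_irrefl cy
    have : pvWalk cy cm cy (k + 1)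
        = (PySem.List.pyRange (k + 1) (cm + 1) 1).map (fun y => create_year_month_time_bucket cy y) :=
      pvWalk_cur cy cm (k + 1)
    simp [h, this, pvBucket_eq]
  · rw [pvWalk]
    have : ¬ (cy < cy ∨ (cy = cy ∧ k ≤ cm)) := by omega
    rw [if_neg this, PySem.List.pyRange_one_eq_nil (by omega)]
    simp
termination_by k => (cm - k + 1).toNat
decreasing_by omega

-- walking in the previous year (k ≤ 12) = previous-year range ++ current-year range
theorem pvWalk_prev (cy cm : Int) : ∀ k : Int, k ≤ 12 →
    pvWalk cy cm (cy - 1) k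
      = (PySem.List.pyRange k 13 1).map (fun y => create_year_month_time_bucket (cy - 1) y)
        ++ (PySem.List.pyRange 1 (cm + 1) 1).map (fun y => create_year_month_time_bucket cy y) := by
  intro k hk
  rw [pvWalk]
  have hc : cy - 1 < cy := by omega
  rw [if_pos (Or.inl hc), PySem.List.pyRange_one_cons (show k < 13 by omega)]
  by_cases h12 : 12 ≤ k
  · have hk12 : k = 12 := by omega
    simp only [hk12, if_pos (And.intro hc (le_refl (12:Int)))]
    rw [pvWalk_cur cy cm 1, PySem.List.pyRange_one_eq_nil (show (13:Int) ≤ 12 + 1 by omega)]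
    simp [pvBucket_eq]
  · have : ¬ (cy - 1 < cy ∧ 12 ≤ k) := by omega
    rw [if_neg this, pvWalk_prev cy cm (k + 1) (by omega)]
    simp [pvBucket_eq]
termination_by k => (13 - k).toNat
decreasing_by omega

theorem pv_eq (cy cm : Int) :
    get_last_few_months_year_month_time_bucket cy cm
      = get_last_few_months_year_month_time_bucket_alt cy cm := by
  unfold get_last_few_months_year_month_time_bucket get_last_few_months_year_month_time_bucket_alt
  by_cases h : cm ≥ (6 : Int)
  · rw [if_pos h, if_pos h, pvWalk_cur cy cm (cm - 5)]
  · rw [if_neg h, if_neg h, pvWalk_prev cy cm (cm + 7) (by omega)]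
    have : 12 - (6 - cm) + 1 = cm + 7 := by ring
    simp [this]

-- ===== VERDICT (by name: the statement is the Claim_ definition above) =====
theorem get_last_few_months_year_month_time_bucket_spec : Claim_equal_get_last_few_months_year_month_time_bucket := by
  intro cy cm _
  exact pv_eq cy cm
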